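-- pv_equiv track=rewrite | github.com/Mmaymer/algoStageJuin23 | plotConcentration.py | varPossibCombi
-- ===== SOURCE A (Python) =====
-- def varPossibCombi(elements,lenght):
--     """Return a list with all the possible combinaisons that can be made with all elements given and limited in size by the lenght given"""
--
--     if lenght==1:
--         return [[ele] for ele in elements]
--
--     poss = varPossibCombi(elements,lenght-1)
--     L=[]
--
--     for i in range(len(poss)):
--         for j in range(len(elements)):
--             data = poss[i]+[elements[j]]
--             L.append(data)
--
--     return L
-- ===== SOURCE B (Python) =====
-- def varPossibCombi(elements, lenght):
--     """Return a list with all the possible combinaisons that can be made with all elements given and limited in size by the lenght given"""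
--     if lenght < 1:
--         raise ValueError("lenght must be >= 1")
--     L = [[ele] for ele in elements]
--     for _ in range(lenght - 1):
--         L = [p + [e] for p in L for e in elements]
--     return L
-- ===== Notes on version B (the rewrite author's own statement) =====
-- stated objective: simpler
-- what changed: Replaced the recursion on lenght plus an index-based double loop with an iterative bottom-up build: start from the singleton lists and extend the accumulator lenght-1 times with a single comprehension; like A, B raises for lenght <= 0 (A via RecursionError, B via an explicit ValueError), those inputs are outside Pre_.
import Mathlib
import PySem

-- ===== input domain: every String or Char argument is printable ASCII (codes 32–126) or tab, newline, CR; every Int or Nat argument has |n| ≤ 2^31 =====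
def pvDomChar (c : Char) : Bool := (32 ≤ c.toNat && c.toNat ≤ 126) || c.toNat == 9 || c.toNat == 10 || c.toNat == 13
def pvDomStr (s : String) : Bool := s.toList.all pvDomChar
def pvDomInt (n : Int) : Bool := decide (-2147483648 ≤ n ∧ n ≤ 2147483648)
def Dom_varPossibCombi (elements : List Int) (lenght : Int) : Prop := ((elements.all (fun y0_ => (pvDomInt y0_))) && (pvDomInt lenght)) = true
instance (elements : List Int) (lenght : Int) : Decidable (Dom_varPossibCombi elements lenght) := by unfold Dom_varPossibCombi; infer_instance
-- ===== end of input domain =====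

-- B replaces A's recursion-plus-indexed-double-loop by an iterative bottom-up build (simpler decomposition, same cost); both raise for lenght ≤ 0.

-- ===== PORT A =====
-- Literal port of A's recursion; for lenght ≤ 0 (and ≠ 1) Python diverges (RecursionError),
-- those inputs are outside Pre_ and the port returns [] there only to be total.
def varPossibCombi (elements : List Int) (lenght : Int) : List (List Int) :=
  if lenght == 1 then
    elements.map (fun ele => [ele])
  else if h : lenght ≤ 1 then
    []  -- unreachable inside Pre_ (Python raises RecursionError here)
  else
    let poss := varPossibCombi elements (lenght - 1)
    (PySem.List.pyRange 0 poss.length 1).foldl (fun L i =>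
      (PySem.List.pyRange 0 elements.length 1).foldl (fun L j =>
        L ++ [PySem.List.pyGetD poss i [] ++ [PySem.List.pyGetD elements j 0]]) L) []
termination_by lenght.toNat
decreasing_by omega

-- ===== PORT B =====
-- For lenght < 1 B raises ValueError; the port returns [] there only to be total (outside Pre_).
def varPossibCombi_alt (elements : List Int) (lenght : Int) : List (List Int) :=
  if lenght < 1 then
    []  -- Python: raise ValueError; unreachable inside Pre_
  else
    (PySem.List.pyRange 0 (lenght - 1) 1).foldl
      (fun L _ => L.flatMap (fun p => elements.map (fun e => p ++ [e])))
      (elements.map (fun ele => [ele]))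

-- ===== PRECONDITION & SPEC =====
-- Pre_ excludes lenght ≤ 0, on which A never reaches its base case and raises RecursionError (B raises ValueError).
def Pre_varPossibCombi (elements : List Int) (lenght : Int) : Prop := 1 ≤ lenght
instance (elements : List Int) (lenght : Int) : Decidable (Pre_varPossibCombi elements lenght) := by unfold Pre_varPossibCombi; infer_instance
def pvWitness_varPossibCombi : List Int × Int := ([1, 2], 3)

def Spec_varPossibCombi (elements : List Int) (lenght : Int) (out : List (List Int)) : Prop := out = varPossibCombi_alt elements lenght
instance (elements : List Int) (lenght : Int) (out : List (List Int)) : Decidable (Spec_varPossibCombi elements lenght out) := by unfold Spec_varPossibCombi; infer_instance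

-- ===== CLAIM (what is proved, stated in full; the proofs are below) =====
def Claim_equal_varPossibCombi : Prop := ∀ (elements : List Int) (lenght : Int), Dom_varPossibCombi elements lenght → Pre_varPossibCombi elements lenght → Spec_varPossibCombi elements lenght (varPossibCombi elements lenght)

-- ===== LEMMAS AND PROOFS =====

-- One extension step, shared shape of both programs.
def pvStep (elements : List Int) (L : List (List Int)) : List (List Int) :=
  L.flatMap (fun p => elements.map (fun e => p ++ [e]))

-- A's double indexed loop is one pvStep applied to the recursive call.
theorem varPossibCombi_step (elements : List Int) (lenght : Int) (h : 2 ≤ lenght) :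
    varPossibCombi elements lenght = pvStep elements (varPossibCombi elements (lenght - 1)) := by
  rw [varPossibCombi]
  have h1 : (lenght == 1) = false := by simp; omega
  have h2 : ¬ lenght ≤ 1 := by omega
  simp only [h1, Bool.false_eq_true, if_false, dif_neg h2]
  rw [PySem.List.foldl_pyRange_zero_pyGetD' (varPossibCombi elements (lenght - 1)) ([] : List Int)
    (fun L p => (PySem.List.pyRange 0 (elements.length : Int) 1).foldl
      (fun L j => L ++ [p ++ [PySem.List.pyGetD elements j 0]]) L) []]
  have inner : ∀ (p : List Int) (acc : List (List Int)),
      (PySem.List.pyRange 0 (elements.length : Int) 1).foldl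
        (fun L j => L ++ [p ++ [PySem.List.pyGetD elements j 0]]) acc
      = acc ++ elements.map (fun e => p ++ [e]) := by
    intro p acc
    rw [PySem.List.foldl_pyRange_zero_pyGetD' elements (0 : Int)
      (fun L e => L ++ [p ++ [e]]) acc]
    exact PySem.List.foldl_append_singleton_eq_map _ _ _
  calc (varPossibCombi elements (lenght - 1)).foldl
        (fun L p => (PySem.List.pyRange 0 (elements.length : Int) 1).foldl
          (fun L j => L ++ [p ++ [PySem.List.pyGetD elements j 0]]) L) []
      = (varPossibCombi elements (lenght - 1)).foldl
          (fun L p => L ++ elements.map (fun e => p ++ [e])) [] := by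
        apply PySem.List.foldl_congr_mem
        intro L p _; exact inner p L
    _ = pvStep elements (varPossibCombi elements (lenght - 1)) := by
        rw [PySem.List.foldl_append_eq_flatMap]; rfl

-- B's loop peels its last iteration as one pvStep.
theorem varPossibCombi_alt_step (elements : List Int) (lenght : Int) (h : 2 ≤ lenght) :
    varPossibCombi_alt elements lenght = pvStep elements (varPossibCombi_alt elements (lenght - 1)) := by
  unfold varPossibCombi_alt
  have hn1 : ¬ lenght < 1 := by omega
  have hn2 : ¬ lenght - 1 < 1 := by omega
  simp only [if_neg hn1, if_neg hn2]
  have : PySem.List.pyRange 0 (lenght - 1) 1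
      = PySem.List.pyRange 0 (lenght - 2) 1 ++ [lenght - 2] := by
    have := PySem.List.pyRange_one_succ_right (a := 0) (b := lenght - 2) (by omega)
    simpa [show lenght - 2 + 1 = lenght - 1 by ring] using this
  rw [this, List.foldl_append]
  simp only [List.foldl_cons, List.foldl_nil, show lenght - 1 - 1 = lenght - 2 from by ring]
  rfl

theorem varPossibCombi_eq_alt_nat (elements : List Int) (n : Nat) :
    varPossibCombi elements ((n : Int) + 1) = varPossibCombi_alt elements ((n : Int) + 1) := by
  induction n with
  | zero =>
      rw [varPossibCombi]
      simp [varPossibCombi_alt, PySem.List.pyRange_one_eq_nil]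
  | succ k ih =>
      have e : ((k + 1 : Nat) : Int) + 1 = (k : Int) + 1 + 1 := by push_cast; ring
      rw [e]
      have h2 : (2 : Int) ≤ (k : Int) + 1 + 1 := by push_cast; omega
      rw [varPossibCombi_step elements _ h2, varPossibCombi_alt_step elements _ h2]
      have : ((k : Int) + 1 + 1) - 1 = (k : Int) + 1 := by ring
      rw [this, ih]

-- ===== VERDICT (by name: the statement is the Claim_ definition above) =====
theorem varPossibCombi_spec : Claim_equal_varPossibCombi := by
  intro elements lenght _ hpre
  unfold Spec_varPossibCombi
  have h : lenght = ((lenght - 1).toNat : Int) + 1 := by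
    unfold Pre_varPossibCombi at hpre; omega
  rw [h]
  exact varPossibCombi_eq_alt_nat elements (lenght - 1).toNat
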